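-- pv_equiv track=rewrite | github.com/DWTwilight/CSIT5730-Group5-Solidity-Obfuscator | utils/file_structure.py | find_safe_positions
-- ===== SOURCE A (Python) =====
-- def between_if_else(content, start_, end_):
--     if_ = 0
--     else_ = 0
--     for i in range(start_, end_):
--         if_ += content[i].count("if")
--         else_ += content[i].count("else")
--         if else_ != if_:
--             return True
--     return False
--
-- def find_safe_positions(content, start_, end_):
--     safe_lines = []
--     left_ = 0
--     right_ = 0
--     stop = False
--     for i in range(start_, end_):
--         line = content[i]
--         for s in line:
--             if s == "}":
--                 right_ += 1
--             if right_ > left_: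
--                 stop = True
--                 break
--             if s == "{":
--                 left_ += 1
--
--         if stop:
--             break
--         if not in_round_brackets(content, i, end_) and not between_if_else(
--             content, i, end_
--         ):
--             safe_lines.append(i)
--
--         # if line.count("{") + line.count("}") == 0 and line.endswith(";\n"):
--         #     if soft:
--         #         safe_lines.append(i)
--         #     else:
--         #         # whether in a for loop or while loop
--         #         if not in_loop(content, start_, func_start_):
--         #             safe_lines.append(i)
--
--     return safe_lines
--
-- def in_round_brackets(content, start_, end_):
--     left_ = 0
--     right_ = 0
--     for i in range(start_, end_):
--         left_ += content[i].count("(")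
--         right_ += content[i].count(")")
--         if right_ != left_:
--             return True
--     return False
-- ===== SOURCE B (Python) =====
-- def find_safe_positions(content, start_, end_):
--     # One pass for the "unbalanced suffix" tests, one pass for the brace cut-off,
--     # then the answer is a single contiguous range.
--     # t = first index from which on no line unbalances parens or if/else counts
--     t = start_
--     for i in range(start_, end_):
--         line = content[i]
--         if line.count("(") != line.count(")") or line.count("if") != line.count("else"):
--             t = i + 1
--     # cut = first line whose scan makes closing braces overtake opening ones
--     cut = end_
--     left = 0
--     right = 0
--     for i in range(start_, end_):
--         stop = False
--         for s in content[i]: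
--             if s == "}":
--                 right += 1
--             if right > left:
--                 stop = True
--                 break
--             if s == "{":
--                 left += 1
--         if stop:
--             cut = i
--             break
--     return list(range(t, cut))
-- ===== Notes on version B (the rewrite author's own statement) =====
-- stated objective: alternative
-- what changed: Instead of re-scanning the whole suffix [i,end_) for unbalanced parens and if/else counts at every line i, B makes one pass recording the last line that unbalances either count (so safety of i is just a comparison) and one pass finding the brace cut-off line, and returns the resulting contiguous range directly.
-- outside the precondition, e.g. on find_safe_positions(['}'], 0, 2): A returns [], B raises IndexError
import Mathlib
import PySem

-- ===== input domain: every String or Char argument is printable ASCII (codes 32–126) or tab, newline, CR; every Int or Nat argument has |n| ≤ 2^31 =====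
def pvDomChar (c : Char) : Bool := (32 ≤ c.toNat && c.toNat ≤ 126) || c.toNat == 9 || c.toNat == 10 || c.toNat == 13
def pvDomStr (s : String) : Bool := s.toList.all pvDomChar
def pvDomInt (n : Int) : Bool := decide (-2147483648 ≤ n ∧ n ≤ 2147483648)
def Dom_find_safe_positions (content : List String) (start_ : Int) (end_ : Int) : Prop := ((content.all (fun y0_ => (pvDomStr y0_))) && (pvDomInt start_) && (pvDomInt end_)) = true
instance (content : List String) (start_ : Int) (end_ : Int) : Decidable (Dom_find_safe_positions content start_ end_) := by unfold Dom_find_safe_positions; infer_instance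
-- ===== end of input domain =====

-- B replaces A's per-line rescans of the whole suffix by one pass recording the last
-- unbalancing line and one pass finding the brace cut-off, returning a single range.

-- content[i]; exact under Pre_ (every index of range(start_, end_) is a valid Python index)
def pvLine (content : List String) (i : Int) : String :=
  (PySem.List.pyGet? content i).getD ""

-- the inner 'for s in line' brace scan shared verbatim by both Pythons: returns (left_, right_, stop)
def pvBraceScan : List Char → Int → Int → Int × Int × Bool
  | [], l, r => (l, r, false)
  | s :: rest, l, r =>
    let r' := if s = '}' then r + 1 else r
    if l < r' then (l, r', true)
    else pvBraceScan rest (if s = '{' then l + 1 else l) r'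

-- ===== PORT A =====
def between_if_else_go (content : List String) : List Int → Int → Int → Bool
  | [], _, _ => false
  | i :: rest, if_, else_ =>
    let if2 := if_ + (PySem.Str.count (pvLine content i) "if" : Int)
    let el2 := else_ + (PySem.Str.count (pvLine content i) "else" : Int)
    if el2 ≠ if2 then true else between_if_else_go content rest if2 el2

def between_if_else (content : List String) (start_ end_ : Int) : Bool :=
  between_if_else_go content (PySem.List.pyRange start_ end_ 1) 0 0

def in_round_brackets_go (content : List String) : List Int → Int → Int → Bool
  | [], _, _ => false
  | i :: rest, l, r =>
    let l2 := l + (PySem.Str.count (pvLine content i) "(" : Int)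
    let r2 := r + (PySem.Str.count (pvLine content i) ")" : Int)
    if r2 ≠ l2 then true else in_round_brackets_go content rest l2 r2

def in_round_brackets (content : List String) (start_ end_ : Int) : Bool :=
  in_round_brackets_go content (PySem.List.pyRange start_ end_ 1) 0 0

def find_safe_positions_go (content : List String) (end_ : Int) :
    List Int → Int → Int → List Int → List Int
  | [], _, _, acc => acc
  | i :: rest, l, r, acc =>
    let res := pvBraceScan (pvLine content i).toList l r
    if res.2.2 then acc
    else
      find_safe_positions_go content end_ rest res.1 res.2.1
        (if in_round_brackets content i end_ = false ∧ between_if_else content i end_ = false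
         then acc ++ [i] else acc)

def find_safe_positions (content : List String) (start_ : Int) (end_ : Int) : List Int :=
  find_safe_positions_go content end_ (PySem.List.pyRange start_ end_ 1) 0 0 []

-- ===== PORT B =====
-- pass 1: t = one past the last line whose '(' / ')' or "if" / "else" counts differ
def pvLastUnbalanced (content : List String) : List Int → Int → Int
  | [], t => t
  | i :: rest, t =>
    pvLastUnbalanced content rest
      (if PySem.Str.count (pvLine content i) "(" ≠ PySem.Str.count (pvLine content i) ")" ∨
          PySem.Str.count (pvLine content i) "if" ≠ PySem.Str.count (pvLine content i) "else"
       then i + 1 else t)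

-- pass 2: first line where the brace scan stops (else the default end_)
def pvBraceCut (content : List String) : List Int → Int → Int → Int → Int
  | [], _, _, cut => cut
  | i :: rest, l, r, cut =>
    let res := pvBraceScan (pvLine content i).toList l r
    if res.2.2 then i else pvBraceCut content rest res.1 res.2.1 cut

def find_safe_positions_alt (content : List String) (start_ : Int) (end_ : Int) : List Int :=
  let t := pvLastUnbalanced content (PySem.List.pyRange start_ end_ 1) start_
  let cut := pvBraceCut content (PySem.List.pyRange start_ end_ 1) 0 0 end_
  PySem.List.pyRange t cut 1

-- ===== PRECONDITION & SPEC =====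
-- Pre_ requires every index of range(start_, end_) to be a valid Python index into content;
-- outside it A almost always raises IndexError, though A can still return (early brace stop
-- or an early helper exit hides the bad index) — those accidental returns are excluded too.
def Pre_find_safe_positions (content : List String) (start_ : Int) (end_ : Int) : Prop :=
  end_ ≤ start_ ∨ (-(content.length : Int) ≤ start_ ∧ end_ ≤ (content.length : Int))
instance (content : List String) (start_ : Int) (end_ : Int) : Decidable (Pre_find_safe_positions content start_ end_) := by unfold Pre_find_safe_positions; infer_instance

def pvWitness_find_safe_positions : List String × Int × Int := (["x = 1;", "{", "}"], 0, 3)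

def Spec_find_safe_positions (content : List String) (start_ : Int) (end_ : Int) (out : List Int) : Prop := out = find_safe_positions_alt content start_ end_
instance (content : List String) (start_ : Int) (end_ : Int) (out : List Int) : Decidable (Spec_find_safe_positions content start_ end_ out) := by unfold Spec_find_safe_positions; infer_instance

-- ===== CLAIM (what is proved, stated in full; the proofs are below) =====
def Claim_equal_find_safe_positions : Prop := ∀ (content : List String) (start_ : Int) (end_ : Int), Dom_find_safe_positions content start_ end_ → Pre_find_safe_positions content start_ end_ → Spec_find_safe_positions content start_ end_ (find_safe_positions content start_ end_)

-- ===== LEMMAS AND PROOFS =====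

-- line i is balanced for both tests
def pvBal (content : List String) (i : Int) : Prop :=
  PySem.Str.count (pvLine content i) "(" = PySem.Str.count (pvLine content i) ")" ∧
  PySem.Str.count (pvLine content i) "if" = PySem.Str.count (pvLine content i) "else"

lemma irb_go_false_iff (content : List String) (idxs : List Int) :
    ∀ c : Int, in_round_brackets_go content idxs c c = false ↔
      ∀ j ∈ idxs, PySem.Str.count (pvLine content j) "(" = PySem.Str.count (pvLine content j) ")" := by
  induction idxs with
  | nil => intro c; simp [in_round_brackets_go]
  | cons i rest ih =>
    intro c
    simp only [in_round_brackets_go]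
    by_cases h : PySem.Str.count (pvLine content i) "(" = PySem.Str.count (pvLine content i) ")"
    · have heq : c + (PySem.Str.count (pvLine content i) ")" : Int)
          = c + (PySem.Str.count (pvLine content i) "(" : Int) := by omega
      rw [if_neg (by omega)]
      rw [heq, ih (c + (PySem.Str.count (pvLine content i) "(" : Int))]
      simp only [List.mem_cons]
      constructor
      · intro hall j hj; rcases hj with rfl | hj; · exact h
        exact hall j hj
      · intro hall j hj; exact hall j (Or.inr hj)
    · rw [if_pos (by omega)]
      simp only [List.mem_cons]
      constructor
      · intro hfalse; exact absurd hfalse (by simp)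
      · intro hall; exact absurd (hall i (Or.inl rfl)) h

lemma bie_go_false_iff (content : List String) (idxs : List Int) :
    ∀ c : Int, between_if_else_go content idxs c c = false ↔
      ∀ j ∈ idxs, PySem.Str.count (pvLine content j) "if" = PySem.Str.count (pvLine content j) "else" := by
  induction idxs with
  | nil => intro c; simp [between_if_else_go]
  | cons i rest ih =>
    intro c
    simp only [between_if_else_go]
    by_cases h : PySem.Str.count (pvLine content i) "if" = PySem.Str.count (pvLine content i) "else"
    · have heq : c + (PySem.Str.count (pvLine content i) "else" : Int)
          = c + (PySem.Str.count (pvLine content i) "if" : Int) := by omega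
      rw [if_neg (by omega)]
      rw [heq, ih (c + (PySem.Str.count (pvLine content i) "if" : Int))]
      simp only [List.mem_cons]
      constructor
      · intro hall j hj; rcases hj with rfl | hj; · exact h
        exact hall j hj
      · intro hall j hj; exact hall j (Or.inr hj)
    · rw [if_pos (by omega)]
      simp only [List.mem_cons]
      constructor
      · intro hfalse; exact absurd hfalse (by simp)
      · intro hall; exact absurd (hall i (Or.inl rfl)) h

-- what pvLastUnbalanced can return
lemma lastU_cases (content : List String) (idxs : List Int) :
    ∀ t : Int, pvLastUnbalanced content idxs t = t ∨
      ∃ j ∈ idxs, ¬ pvBal content j ∧ pvLastUnbalanced content idxs t = j + 1 := by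
  induction idxs with
  | nil => intro t; left; rfl
  | cons i rest ih =>
    intro t
    simp only [pvLastUnbalanced]
    by_cases h : PySem.Str.count (pvLine content i) "(" ≠ PySem.Str.count (pvLine content i) ")" ∨
        PySem.Str.count (pvLine content i) "if" ≠ PySem.Str.count (pvLine content i) "else"
    · rw [if_pos h]
      rcases ih (i + 1) with heq | ⟨j, hj, hb, heq⟩
      · right; exact ⟨i, List.mem_cons_self, by unfold pvBal; tauto, heq⟩
      · right; exact ⟨j, List.mem_cons_of_mem _ hj, hb, heq⟩
    · rw [if_neg h]
      rcases ih t with heq | ⟨j, hj, hb, heq⟩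
      · left; exact heq
      · right; exact ⟨j, List.mem_cons_of_mem _ hj, hb, heq⟩

-- lower bound from the accumulator
lemma lastU_lb (content : List String) (a e t : Int) (h : t ≤ a + 1) :
    t ≤ pvLastUnbalanced content (PySem.List.pyRange a e 1) t := by
  rcases lastU_cases content (PySem.List.pyRange a e 1) t with heq | ⟨j, hj, _, heq⟩
  · omega
  · rw [PySem.List.mem_pyRange_one] at hj; omega

-- every unbalanced line pushes the result past it
lemma lastU_ge (content : List String) (e : Int) :
    ∀ (n : Nat) (a t i : Int), (e - a).toNat = n → a ≤ i → i < e → ¬ pvBal content i →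
      i + 1 ≤ pvLastUnbalanced content (PySem.List.pyRange a e 1) t := by
  intro n
  induction n with
  | zero => intro a t i hn hai hie _; omega
  | succ m ih =>
    intro a t i hn hai hie hbal
    have hae : a < e := by omega
    rw [PySem.List.pyRange_one_cons hae]
    simp only [pvLastUnbalanced]
    rcases eq_or_lt_of_le hai with heq | hlt
    · subst heq
      have hcond : PySem.Str.count (pvLine content a) "(" ≠ PySem.Str.count (pvLine content a) ")" ∨
          PySem.Str.count (pvLine content a) "if" ≠ PySem.Str.count (pvLine content a) "else" := by
        unfold pvBal at hbal; tauto
      rw [if_pos hcond]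
      exact lastU_lb content (a + 1) e (a + 1) (by omega)
    · exact ih (a + 1) _ i (by omega) (by omega) hie hbal

-- the two suffix rescans of A, as one comparison against B's t
lemma safe_iff (content : List String) (s e i : Int) (hsi : s ≤ i) :
    (in_round_brackets content i e = false ∧ between_if_else content i e = false) ↔
      pvLastUnbalanced content (PySem.List.pyRange s e 1) s ≤ i := by
  unfold in_round_brackets between_if_else
  rw [irb_go_false_iff, bie_go_false_iff]
  constructor
  · intro ⟨hp, hq⟩
    rcases lastU_cases content (PySem.List.pyRange s e 1) s with heq | ⟨j, hj, hb, heq⟩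
    · omega
    · rw [PySem.List.mem_pyRange_one] at hj
      by_cases hji : j < i
      · omega
      · exfalso
        have hmem : j ∈ PySem.List.pyRange i e 1 := by
          rw [PySem.List.mem_pyRange_one]; omega
        exact hb ⟨hp j hmem, hq j hmem⟩
  · intro ht
    constructor <;> intro j hj <;> rw [PySem.List.mem_pyRange_one] at hj <;>
      by_contra hne
    · have := lastU_ge content e (e - s).toNat s s j rfl (by omega) (by omega)
        (by unfold pvBal; tauto)
      omega
    · have := lastU_ge content e (e - s).toNat s s j rfl (by omega) (by omega)
        (by unfold pvBal; tauto)
      omega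

-- pvBraceCut returns the default or a member of the index list
lemma braceCut_cases (content : List String) (idxs : List Int) :
    ∀ l r cut : Int, pvBraceCut content idxs l r cut = cut ∨
      pvBraceCut content idxs l r cut ∈ idxs := by
  induction idxs with
  | nil => intro l r cut; left; rfl
  | cons i rest ih =>
    intro l r cut
    simp only [pvBraceCut]
    by_cases h : (pvBraceScan (pvLine content i).toList l r).2.2 = true
    · simp only [h, if_true]; right; exact List.mem_cons_self
    · simp only [h, if_false, Bool.false_eq_true]
      rcases ih (pvBraceScan (pvLine content i).toList l r).1
          (pvBraceScan (pvLine content i).toList l r).2.1 cut with heq | hm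
      · left; exact heq
      · right; exact List.mem_cons_of_mem _ hm

-- the main loop of A produces exactly the range [max a t, cut)
lemma fsp_go_eq (content : List String) (s e : Int) :
    ∀ (n : Nat) (a l r : Int) (acc : List Int), (e - a).toNat = n → s ≤ a →
      find_safe_positions_go content e (PySem.List.pyRange a e 1) l r acc
        = acc ++ PySem.List.pyRange
            (max a (pvLastUnbalanced content (PySem.List.pyRange s e 1) s))
            (pvBraceCut content (PySem.List.pyRange a e 1) l r e) 1 := by
  intro n
  induction n with
  | zero =>
    intro a l r acc hn _
    rw [PySem.List.pyRange_one_eq_nil (by omega)]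
    simp only [find_safe_positions_go, pvBraceCut]
    rw [PySem.List.pyRange_one_eq_nil (le_trans (by omega) (le_max_left a _)), List.append_nil]
  | succ m ih =>
    intro a l r acc hn hsa
    have hae : a < e := by omega
    rw [PySem.List.pyRange_one_cons hae]
    simp only [find_safe_positions_go, pvBraceCut]
    by_cases hstop : (pvBraceScan (pvLine content a).toList l r).2.2 = true
    · simp only [hstop, if_true]
      rw [PySem.List.pyRange_one_eq_nil (le_max_left a _), List.append_nil]
    · simp only [hstop, if_false, Bool.false_eq_true]
      set l' := (pvBraceScan (pvLine content a).toList l r).1 with hl'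
      set r' := (pvBraceScan (pvLine content a).toList l r).2.1 with hr'
      set t := pvLastUnbalanced content (PySem.List.pyRange s e 1) s with hT
      set cut' := pvBraceCut content (PySem.List.pyRange (a + 1) e 1) l' r' e with hcut
      have hcut_gt : a < cut' := by
        rcases braceCut_cases content (PySem.List.pyRange (a + 1) e 1) l' r' e with heq | hm
        · omega
        · rw [hcut]; rw [PySem.List.mem_pyRange_one] at hm; omega
      by_cases hsafe : in_round_brackets content a e = false ∧ between_if_else content a e = false
      · have hta : t ≤ a := (safe_iff content s e a hsa).mp hsafe
        rw [if_pos hsafe]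
        rw [ih (a + 1) l' r' (acc ++ [a]) (by omega) (by omega)]
        rw [max_eq_left (by omega), max_eq_left (by omega)]
        rw [List.append_assoc]
        congr 1
        rw [PySem.List.pyRange_one_cons hcut_gt]
        rfl
      · have hta : ¬ t ≤ a := fun h => hsafe ((safe_iff content s e a hsa).mpr h)
        rw [if_neg hsafe]
        rw [ih (a + 1) l' r' acc (by omega) (by omega)]
        rw [max_eq_right (by omega), max_eq_right (by omega)]

-- ===== VERDICT (by name: the statement is the Claim_ definition above) =====
theorem find_safe_positions_spec : Claim_equal_find_safe_positions := by
  intro content start_ end_ _ _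
  unfold Spec_find_safe_positions find_safe_positions find_safe_positions_alt
  rw [fsp_go_eq content start_ end_ (end_ - start_).toNat start_ 0 0 [] rfl le_rfl]
  rw [List.nil_append]
  rw [max_eq_right (lastU_lb content start_ end_ start_ (by omega))]
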